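-- pv_equiv track=rewrite | github.com/DS-Pokemon-Rom-Editor/scrcmd-database | scripts/sync_from_decomp.py | build_legacy_name_map
-- ===== SOURCE A (Python) =====
-- def build_legacy_name_map(commands: dict) -> dict[str, str]:
--     """Build a reverse lookup of legacy_name -> current database key."""
--     legacy_map: dict[str, str] = {}
--     ambiguous = set()
--
--     for name, data in commands.items():
--         legacy_name = data.get("legacy_name")
--         if not legacy_name:
--             continue
--         if legacy_name in legacy_map and legacy_map[legacy_name] != name:
--             ambiguous.add(legacy_name)
--             continue
--         legacy_map[legacy_name] = name
--
--     for legacy_name in ambiguous: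
--         legacy_map.pop(legacy_name, None)
--
--     return legacy_map
-- ===== SOURCE B (Python) =====
-- def build_legacy_name_map(commands: dict) -> dict[str, str]:
--     """Build a reverse lookup of legacy_name -> current database key."""
--     groups: dict[str, list[str]] = {}
--     for name, data in commands.items():
--         legacy_name = data.get("legacy_name")
--         if not legacy_name:
--             continue
--         groups.setdefault(legacy_name, []).append(name)
--     return {ln: names[0] for ln, names in groups.items() if len(names) == 1}
-- ===== Notes on version B (the rewrite author's own statement) =====
-- stated objective: simpler
-- what changed: Replaces the first-seen map + ambiguous set + pop cleanup with a single grouping pass (legacy_name -> list of keys via setdefault) followed by a dict comprehension keeping only the groups of size one; Pre_ only excludes association lists with duplicate outer keys, which no Python dict can represent.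
import Mathlib
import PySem

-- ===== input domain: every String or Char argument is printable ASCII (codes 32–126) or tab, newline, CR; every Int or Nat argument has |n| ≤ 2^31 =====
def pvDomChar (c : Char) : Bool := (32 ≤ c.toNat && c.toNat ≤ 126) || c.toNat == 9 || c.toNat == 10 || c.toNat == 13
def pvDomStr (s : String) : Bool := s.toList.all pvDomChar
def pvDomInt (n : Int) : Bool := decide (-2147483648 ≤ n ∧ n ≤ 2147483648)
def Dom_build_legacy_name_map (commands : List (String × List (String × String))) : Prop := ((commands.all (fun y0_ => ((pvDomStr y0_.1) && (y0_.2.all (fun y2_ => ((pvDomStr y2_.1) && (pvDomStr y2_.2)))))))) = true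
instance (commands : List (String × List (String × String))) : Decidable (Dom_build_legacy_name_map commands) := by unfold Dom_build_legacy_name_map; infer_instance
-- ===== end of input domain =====

-- B replaces A's first-seen-map + ambiguous-set + pop-cleanup with one grouping pass
-- (legacy_name -> list of keys) followed by a comprehension keeping size-one groups (objective: simpler).

-- ===== PORT A =====
def build_legacy_name_map (commands : List (String × List (String × String))) : List (String × String) :=
  let st := commands.foldl
    (fun (st : PySem.Dict String String × PySem.Set String) nd =>
      match (PySem.Dict.ofList nd.2).get? "legacy_name" with   -- data.get("legacy_name")
      | none => st                                             -- falsy: missing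
      | some ln =>
        if ln = "" then st                                     -- falsy: empty string
        else if st.1.contains ln = true ∧ st.1.get? ln ≠ some nd.1 then
          (st.1, PySem.Set.add st.2 ln)
        else
          (st.1.insert ln nd.1, st.2))
    (PySem.Dict.empty, PySem.Set.empty)
  -- for legacy_name in ambiguous: legacy_map.pop(legacy_name, None)
  (st.2.foldl (fun m ln => m.erase ln) st.1).items

-- ===== PORT B =====
def build_legacy_name_map_alt (commands : List (String × List (String × String))) : List (String × String) :=
  let groups := commands.foldl
    (fun (g : PySem.Dict String (List String)) nd =>
      match (PySem.Dict.ofList nd.2).get? "legacy_name" with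
      | none => g
      | some ln =>
        if ln = "" then g
        else g.modify ln [] (fun ns => ns ++ [nd.1]))          -- groups.setdefault(ln, []).append(name)
    PySem.Dict.empty
  -- {ln: names[0] for ln, names in groups.items() if len(names) == 1}; names[0] exact via headD since length = 1
  groups.items.filterMap (fun p => if p.2.length = 1 then some (p.1, p.2.headD "") else none)

-- ===== PRECONDITION & SPEC =====
-- Pre_ excludes lists with duplicate outer keys: a Python dict cannot hold two identical keys
-- (construction collapses them), so the association-list inputs it excludes have no dict counterpart.
def Pre_build_legacy_name_map (commands : List (String × List (String × String))) : Prop :=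
  (commands.map Prod.fst).Nodup
instance (commands : List (String × List (String × String))) : Decidable (Pre_build_legacy_name_map commands) := by unfold Pre_build_legacy_name_map; infer_instance

def pvWitness_build_legacy_name_map : (List (String × List (String × String))) :=
  [("cmd1", [("legacy_name", "x")]), ("cmd2", [("legacy_name", "x")]), ("cmd3", [("legacy_name", "y")]), ("cmd4", [("other", "v")])]

def Spec_build_legacy_name_map (commands : List (String × List (String × String))) (out : List (String × String)) : Prop := out = build_legacy_name_map_alt commands
instance (commands : List (String × List (String × String))) (out : List (String × String)) : Decidable (Spec_build_legacy_name_map commands out) := by unfold Spec_build_legacy_name_map; infer_instance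

-- ===== CLAIM (what is proved, stated in full; the proofs are below) =====
def Claim_equal_build_legacy_name_map : Prop := ∀ (commands : List (String × List (String × String))), Dom_build_legacy_name_map commands → Pre_build_legacy_name_map commands → Spec_build_legacy_name_map commands (build_legacy_name_map commands)

-- ===== LEMMAS AND PROOFS =====

-- the two loop bodies, named for the proofs (definitionally the lambdas in the ports)
def pvStepA (st : PySem.Dict String String × PySem.Set String) (nd : String × List (String × String)) : PySem.Dict String String × PySem.Set String :=
  match (PySem.Dict.ofList nd.2).get? "legacy_name" with
  | none => st
  | some ln =>
    if ln = "" then st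
    else if st.1.contains ln = true ∧ st.1.get? ln ≠ some nd.1 then
      (st.1, PySem.Set.add st.2 ln)
    else
      (st.1.insert ln nd.1, st.2)

def pvStepB (g : PySem.Dict String (List String)) (nd : String × List (String × String)) : PySem.Dict String (List String) :=
  match (PySem.Dict.ofList nd.2).get? "legacy_name" with
  | none => g
  | some ln =>
    if ln = "" then g
    else g.modify ln [] (fun ns => ns ++ [nd.1])

def pvF (p : String × List String) : String × String := (p.1, p.2.headD "")

-- the invariant tying A's (legacy_map, ambiguous) to B's groups
def pvInv (lm : PySem.Dict String String) (amb : PySem.Set String) (g : PySem.Dict String (List String)) : Prop :=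
  lm.items = g.items.map pvF ∧
  g.keys.Nodup ∧
  (∀ p ∈ g.items, p.2 ≠ []) ∧
  (∀ x : String, x ∈ amb ↔ ∃ ns, (x, ns) ∈ g.items ∧ 2 ≤ ns.length)

lemma pv_assoc_unique {ν : Type} (g : PySem.Dict String ν) (h : g.keys.Nodup) {k : String} {v v' : ν}
    (h1 : (k, v) ∈ g.items) (h2 : (k, v') ∈ g.items) : v = v' := by
  have e1 := PySem.Dict.get?_of_mem_items g h1 h
  have e2 := PySem.Dict.get?_of_mem_items g h2 h
  rw [e1] at e2; exact Option.some.inj e2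

lemma pv_headD_append {α : Type} (ns t : List α) (d : α) (h : ns ≠ []) : (ns ++ t).headD d = ns.headD d := by
  cases ns with
  | nil => exact absurd rfl h
  | cons a l => rfl

lemma pv_headD_mem {α : Type} (ns : List α) (d : α) (h : ns ≠ []) : ns.headD d ∈ ns := by
  cases ns with
  | nil => exact absurd rfl h
  | cons a l => exact List.mem_cons_self

lemma pv_filterMap_if {α β : Type} (l : List α) (q : α → Prop) [DecidablePred q] (f : α → β) :
    l.filterMap (fun a => if q a then some (f a) else none) = (l.filter (fun a => decide (q a))).map f := by
  induction l with
  | nil => rfl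
  | cons a t ih =>
    by_cases h : q a <;> simp [h, ih]

-- pops from the ambiguous set = filtering the map by non-membership
lemma pv_foldl_erase (amb : List String) (lm : PySem.Dict String String) :
    (amb.foldl (fun m ln => m.erase ln) lm).items = lm.items.filter (fun p => decide (p.1 ∉ amb)) := by
  induction amb generalizing lm with
  | nil => simp
  | cons x t ih =>
    rw [List.foldl_cons, ih]
    show (lm.items.filter _).filter _ = _
    rw [List.filter_filter]
    apply List.filter_congr
    intro p _
    have hmc : (p.1 ∈ x :: t) ↔ (p.1 = x ∨ p.1 ∈ t) := List.mem_cons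
    by_cases hx : p.1 = x <;> by_cases ht : p.1 ∈ t <;>
      simp [hmc, hx, ht]

lemma pv_keys_eq (lm : PySem.Dict String String) (g : PySem.Dict String (List String))
    (h : lm.items = g.items.map pvF) : lm.keys = g.keys := by
  show lm.items.map Prod.fst = g.items.map Prod.fst
  rw [h, List.map_map]; rfl

lemma pv_step_inv (nd : String × List (String × String))
    (lm : PySem.Dict String String) (amb : PySem.Set String) (g : PySem.Dict String (List String))
    (hinv : pvInv lm amb g)
    (hfresh : ∀ p ∈ g.items, nd.1 ∉ p.2) :
    pvInv (pvStepA (lm, amb) nd).1 (pvStepA (lm, amb) nd).2 (pvStepB g nd) ∧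
    (∀ p ∈ (pvStepB g nd).items, ∀ n ∈ p.2, n ∈ g.items.flatMap Prod.snd ∨ n = nd.1) := by
  obtain ⟨h1, h2, h3, h4⟩ := hinv
  unfold pvStepA pvStepB
  cases hln : (PySem.Dict.ofList nd.2).get? "legacy_name" with
  | none =>
    refine ⟨⟨h1, h2, h3, h4⟩, ?_⟩
    intro p hp n hn; exact Or.inl (List.mem_flatMap.mpr ⟨p, hp, hn⟩)
  | some ln =>
    by_cases hemp : ln = ""
    · simp only [hemp]
      refine ⟨⟨h1, h2, h3, h4⟩, ?_⟩
      intro p hp n hn; exact Or.inl (List.mem_flatMap.mpr ⟨p, hp, hn⟩)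
    · simp only [if_neg hemp]
      have hkeys : lm.keys = g.keys := pv_keys_eq lm g h1
      by_cases hmem : ln ∈ g.keys
      · -- ln already grouped: A marks ambiguous, B appends
        obtain ⟨ns, hpair⟩ : ∃ ns, (ln, ns) ∈ g.items := by
          have hmem2 : ∃ p ∈ g.items, p.1 = ln := by
            simpa [PySem.Dict.keys] using hmem
          obtain ⟨⟨k, ns⟩, hp, hk⟩ := hmem2
          rw [show k = ln from hk] at hp
          exact ⟨ns, hp⟩
        have hns : ns ≠ [] := h3 _ hpair
        have hlmmem : ((ln, ns.headD "") : String × String) ∈ lm.items := by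
          rw [h1]; exact List.mem_map.mpr ⟨(ln, ns), hpair, rfl⟩
        have hlmnodup : lm.keys.Nodup := by rw [hkeys]; exact h2
        have hget : lm.get? ln = some (ns.headD "") := PySem.Dict.get?_of_mem_items lm hlmmem hlmnodup
        have hne : ns.headD "" ≠ nd.1 := by
          intro he; exact hfresh _ hpair (he ▸ pv_headD_mem ns "" hns)
        have hcond : lm.contains ln = true ∧ lm.get? ln ≠ some nd.1 := by
          constructor
          · rw [PySem.Dict.contains_eq_isSome_get?, hget]; rfl
          · rw [hget]; intro he; exact hne (Option.some.inj he)
        rw [if_pos hcond]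
        have hgetD : g.getD ln [] = ns := PySem.Dict.getD_of_mem_items g hpair h2 []
        have hcont : g.contains ln = true := by
          rw [PySem.Dict.contains_eq_decide_mem_keys]; exact decide_eq_true hmem
        have hitems' : (g.modify ln [] (fun ns => ns ++ [nd.1])).items
            = g.items.map (fun p => if (p.1 == ln) = true then (ln, ns ++ [nd.1]) else p) := by
          show (g.insert ln _).items = _
          rw [PySem.Dict.items_insert, if_pos hcont, hgetD]
        have huniq : ∀ p ∈ g.items, (p.1 == ln) = true → p = (ln, ns) := by
          rintro ⟨p1, p2⟩ hp he
          have hpe : p1 = ln := eq_of_beq he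
          rw [hpe] at hp ⊢
          rw [pv_assoc_unique g h2 hp hpair]
        refine ⟨⟨?_, ?_, ?_, ?_⟩, ?_⟩
        · -- items of lm unchanged and equal to mapped new groups
          rw [hitems', List.map_map, h1]
          apply List.map_congr_left
          intro p hp
          by_cases hb : (p.1 == ln) = true
          · have hpns := huniq p hp hb
            subst hpns
            simp only [Function.comp_apply, if_pos hb, pvF]
            rw [pv_headD_append ns [nd.1] "" hns]
          · simp only [Function.comp_apply, if_neg hb]
        · show (g.modify ln [] (fun ns => ns ++ [nd.1])).items.map Prod.fst |>.Nodup
          rw [hitems', List.map_map]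
          have : (g.items.map (Prod.fst ∘ fun p => if (p.1 == ln) = true then ((ln, ns ++ [nd.1]) : String × List String) else p)) = g.items.map Prod.fst := by
            apply List.map_congr_left
            intro p hp
            by_cases hb : (p.1 == ln) = true
            · simp only [Function.comp_apply, if_pos hb]; exact (eq_of_beq hb).symm
            · simp only [Function.comp_apply, if_neg hb]
          rw [this]; exact h2
        · intro p hp
          rw [hitems'] at hp
          obtain ⟨q, hq, he⟩ := List.mem_map.mp hp
          by_cases hb : (q.1 == ln) = true
          · rw [if_pos hb] at he; rw [← he]; simp [hns]
          · rw [if_neg hb] at he; rw [← he]; exact h3 q hq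
        · intro x
          rw [PySem.Set.mem_add, hitems']
          constructor
          · rintro (hx | hxl)
            · obtain ⟨ns', hns', hlen⟩ := (h4 x).mp hx
              by_cases hb : x = ln
              · rw [hb]
                refine ⟨ns ++ [nd.1], List.mem_map.mpr ⟨(ln, ns), hpair, by simp⟩, ?_⟩
                have := List.length_pos_iff.mpr hns
                simp; omega
              · refine ⟨ns', List.mem_map.mpr ⟨(x, ns'), hns', ?_⟩, hlen⟩
                have : (x == ln) = false := beq_eq_false_iff_ne.mpr hb
                simp [this]
            · rw [hxl]
              refine ⟨ns ++ [nd.1], List.mem_map.mpr ⟨(ln, ns), hpair, by simp⟩, ?_⟩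
              have : 1 ≤ ns.length := List.length_pos_iff.mpr hns
              simp; omega
          · rintro ⟨ns', hns', hlen⟩
            obtain ⟨q, hq, he⟩ := List.mem_map.mp hns'
            by_cases hb : (q.1 == ln) = true
            · rw [if_pos hb] at he
              cases he
              exact Or.inr rfl
            · rw [if_neg hb] at he
              rw [he] at hq
              exact Or.inl ((h4 x).mpr ⟨ns', hq, hlen⟩)
        · intro p hp n hn
          rw [hitems'] at hp
          obtain ⟨q, hq, he⟩ := List.mem_map.mp hp
          by_cases hb : (q.1 == ln) = true
          · rw [if_pos hb] at he
            rw [← he] at hn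
            rcases List.mem_append.mp hn with h | h
            · exact Or.inl (List.mem_flatMap.mpr ⟨(ln, ns), hpair, h⟩)
            · exact Or.inr (List.mem_singleton.mp h)
          · rw [if_neg hb] at he
            rw [he] at hq
            exact Or.inl (List.mem_flatMap.mpr ⟨p, hq, hn⟩)
      · -- fresh legacy_name: both append a new entry
        have hcontg : g.contains ln = false := by
          rw [PySem.Dict.contains_eq_decide_mem_keys]; exact decide_eq_false hmem
        have hnk : ln ∉ lm.keys := by rw [hkeys]; exact hmem
        have hcontlm : lm.contains ln = false := by
          rw [PySem.Dict.contains_eq_decide_mem_keys]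
          exact decide_eq_false hnk
        have hcond : ¬ (lm.contains ln = true ∧ lm.get? ln ≠ some nd.1) := by
          rintro ⟨hc, -⟩; rw [hcontlm] at hc; exact Bool.false_ne_true hc
        rw [if_neg hcond]
        have hitems' : (g.modify ln [] (fun ns => ns ++ [nd.1])).items = g.items ++ [(ln, [nd.1])] := by
          show (g.insert ln _).items = _
          rw [PySem.Dict.items_insert, if_neg (by rw [hcontg]; exact Bool.false_ne_true),
              PySem.Dict.getD_of_not_contains g [] hcontg]
          rfl
        have hitemslm : (lm.insert ln nd.1).items = lm.items ++ [(ln, nd.1)] := by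
          rw [PySem.Dict.items_insert, if_neg (by rw [hcontlm]; exact Bool.false_ne_true)]
        refine ⟨⟨?_, ?_, ?_, ?_⟩, ?_⟩
        · rw [hitemslm, hitems', List.map_append, h1]; rfl
        · have hkeys' : (g.modify ln [] (fun ns => ns ++ [nd.1])).keys = g.keys ++ [ln] := by
            show List.map (fun x => x.1) (g.modify ln [] (fun ns => ns ++ [nd.1])).items = g.keys ++ [ln]
            rw [hitems', List.map_append]
            rfl
          rw [hkeys', List.nodup_append]
          refine ⟨h2, List.nodup_singleton ln, ?_⟩
          intro a ha b hb
          rw [List.mem_singleton.mp hb]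
          intro he
          exact hmem (he ▸ ha)
        · intro p hp
          rw [hitems'] at hp
          rcases List.mem_append.mp hp with h | h
          · exact h3 p h
          · rw [List.mem_singleton.mp h]; simp
        · intro x
          rw [hitems']
          constructor
          · intro hx
            obtain ⟨ns', hns', hlen⟩ := (h4 x).mp hx
            exact ⟨ns', List.mem_append.mpr (Or.inl hns'), hlen⟩
          · rintro ⟨ns', hns', hlen⟩
            rcases List.mem_append.mp hns' with h | h
            · exact (h4 x).mpr ⟨ns', h, hlen⟩
            · have := List.mem_singleton.mp h
              have h5 : ns' = [nd.1] := by injection this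
              rw [h5] at hlen; simp at hlen
        · intro p hp n hn
          rw [hitems'] at hp
          rcases List.mem_append.mp hp with h | h
          · exact Or.inl (List.mem_flatMap.mpr ⟨p, h, hn⟩)
          · rw [List.mem_singleton.mp h] at hn
            exact Or.inr (List.mem_singleton.mp hn)

lemma pv_loop_inv (cs : List (String × List (String × String)))
    (lm : PySem.Dict String String) (amb : PySem.Set String) (g : PySem.Dict String (List String))
    (hinv : pvInv lm amb g)
    (hnd : (cs.map Prod.fst).Nodup)
    (hfresh : ∀ nd ∈ cs, ∀ p ∈ g.items, nd.1 ∉ p.2) :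
    pvInv (cs.foldl pvStepA (lm, amb)).1 (cs.foldl pvStepA (lm, amb)).2 (cs.foldl pvStepB g) := by
  induction cs generalizing lm amb g with
  | nil => exact hinv
  | cons nd t ih =>
    rw [List.map_cons, List.nodup_cons] at hnd
    obtain ⟨hstep, hsub⟩ := pv_step_inv nd lm amb g hinv (hfresh nd List.mem_cons_self)
    rw [List.foldl_cons, List.foldl_cons]
    have : (pvStepA (lm, amb) nd) = ((pvStepA (lm, amb) nd).1, (pvStepA (lm, amb) nd).2) := rfl
    rw [this]
    apply ih _ _ _ hstep hnd.2
    intro nd' hnd' p hp hn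
    rcases hsub p hp nd'.1 hn with h | h
    · obtain ⟨q, hq, hqn⟩ := List.mem_flatMap.mp h
      exact hfresh nd' (List.mem_cons_of_mem _ hnd') q hq hqn
    · exact hnd.1 (h ▸ List.mem_map.mpr ⟨nd', hnd', rfl⟩)

lemma pv_final (lm : PySem.Dict String String) (amb : PySem.Set String) (g : PySem.Dict String (List String))
    (hinv : pvInv lm amb g) :
    (amb.foldl (fun m ln => m.erase ln) lm).items
      = g.items.filterMap (fun p => if p.2.length = 1 then some (p.1, p.2.headD "") else none) := by
  obtain ⟨h1, h2, h3, h4⟩ := hinv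
  rw [pv_foldl_erase, h1, List.filter_map,
      pv_filterMap_if g.items (fun p => p.2.length = 1) (fun p => (p.1, p.2.headD ""))]
  have hpt : ∀ p ∈ g.items, ((fun p => decide (p.1 ∉ amb)) ∘ pvF) p = decide (p.2.length = 1) := by
    rintro ⟨p1, p2⟩ hp
    have hnem : p2 ≠ [] := h3 _ hp
    have hlen1 : 1 ≤ p2.length := List.length_pos_iff.mpr hnem
    have hiff : p1 ∉ amb ↔ p2.length = 1 := by
      rw [h4 p1]
      constructor
      · intro hno
        by_contra hne
        exact hno ⟨p2, hp, by omega⟩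
      · rintro hone ⟨ns', hns', hlen⟩
        rw [pv_assoc_unique g h2 hns' hp] at hlen
        omega
    simp only [Function.comp_apply, pvF]
    exact decide_eq_decide.mpr hiff
  exact congrArg (List.map _) (List.filter_congr hpt)

-- ===== VERDICT (by name: the statement is the Claim_ definition above) =====
theorem build_legacy_name_map_spec : Claim_equal_build_legacy_name_map := by
  intro commands _ hpre
  unfold Spec_build_legacy_name_map build_legacy_name_map build_legacy_name_map_alt
  have hinv0 : pvInv PySem.Dict.empty PySem.Set.empty PySem.Dict.empty := by
    refine ⟨rfl, List.nodup_nil, ?_, ?_⟩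
    · intro p hp; cases hp
    · intro x
      constructor
      · intro hx; cases hx
      · rintro ⟨ns, hns, -⟩; cases hns
  have h := pv_loop_inv commands PySem.Dict.empty PySem.Set.empty PySem.Dict.empty hinv0 hpre
    (by intro nd _ p hp; cases hp)
  exact pv_final _ _ _ h
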